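-- pv_equiv track=rewrite | github.com/SDLSY/Verspor | tools/collect_avatar_tts_evidence.py | extract_network_lines
-- ===== SOURCE A (Python) =====
-- def extract_network_lines(log_text: str) -> list[str]:
--     patterns = (
--         "Unable to resolve host",
--         "UnknownHostException",
--         "avatar",
--         "speech",
--         "AudioTrack",
--         "MediaPlayer",
--         "playback failed",
--         "newstart",
--     )
--     lines = []
--     for line in log_text.splitlines():
--         lowered = line.lower()
--         if any(pattern.lower() in lowered for pattern in patterns):
--             lines.append(line)
--     return lines
-- ===== SOURCE B (Python) =====
-- # B: pattern-major staged passes — lower every line once, sweep the lowered lines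
-- # once per pattern collecting the set of matching line indices, then rebuild the
-- # answer in order from the sorted index set (A is line-major with an inner any()).
-- def extract_network_lines(log_text: str) -> list[str]:
--     patterns = (
--         "Unable to resolve host",
--         "UnknownHostException",
--         "avatar",
--         "speech",
--         "AudioTrack",
--         "MediaPlayer",
--         "playback failed",
--         "newstart",
--     )
--     lines = log_text.splitlines()
--     lowered = [line.lower() for line in lines]
--     hits = set()
--     for pattern in patterns:
--         low = pattern.lower()
--         for i, line in enumerate(lowered):
--             if low in line:
--                 hits.add(i)
--     return [lines[i] for i in sorted(hits)]
-- ===== Notes on version B (the rewrite author's own statement) =====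
-- stated objective: alternative
-- what changed: Transposes the loops: instead of A's line-major pass with an inner any() over the eight patterns, B lowers every line once, then runs one pattern-major sweep per pattern collecting a set of matching line indices, and finally reconstructs the selected lines in order from the sorted index set.
import Mathlib
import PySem

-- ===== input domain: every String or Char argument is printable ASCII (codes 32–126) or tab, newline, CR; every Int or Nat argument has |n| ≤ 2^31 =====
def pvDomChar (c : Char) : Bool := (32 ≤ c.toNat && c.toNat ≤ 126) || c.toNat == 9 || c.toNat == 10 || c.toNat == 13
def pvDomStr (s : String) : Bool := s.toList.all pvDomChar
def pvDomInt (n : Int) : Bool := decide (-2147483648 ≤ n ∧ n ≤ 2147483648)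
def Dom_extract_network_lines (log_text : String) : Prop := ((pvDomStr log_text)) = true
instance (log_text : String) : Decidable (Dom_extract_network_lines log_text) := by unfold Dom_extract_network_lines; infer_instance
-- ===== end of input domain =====

-- B transposes A's loops: one pattern-major sweep per lowered pattern over the
-- once-lowered lines collects a set of matching line indices, and the answer is
-- rebuilt in order from the sorted index set (alternative algorithm, same values).


-- ===== PORT A =====
def extract_network_lines (log_text : String) : List String :=
  let patterns : List String :=
    ["Unable to resolve host", "UnknownHostException", "avatar", "speech",
     "AudioTrack", "MediaPlayer", "playback failed", "newstart"]
  (PySem.Str.splitlines log_text).foldl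
    (fun lines line =>
      let lowered := PySem.Str.lower line
      if patterns.any (fun pattern => PySem.Str.isIn (PySem.Str.lower pattern) lowered)
      then lines ++ [line] else lines) []

-- ===== PORT B =====
def extract_network_lines_alt (log_text : String) : List String :=
  let patterns : List String :=
    ["Unable to resolve host", "UnknownHostException", "avatar", "speech",
     "AudioTrack", "MediaPlayer", "playback failed", "newstart"]
  let lines := PySem.Str.splitlines log_text
  let lowered := lines.map (fun line => PySem.Str.lower line)
  let hits : PySem.Set Int :=
    patterns.foldl
      (fun hits pattern =>
        let low := PySem.Str.lower pattern
        (PySem.List.enumerate lowered 0).foldl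
          (fun hits il => if PySem.Str.isIn low il.2 then PySem.Set.add hits il.1 else hits)
          hits)
      PySem.Set.empty
  (PySem.List.sorted hits (fun i => i)).map (fun i => PySem.List.pyGetD lines i "")

-- ===== PRECONDITION & SPEC =====
def Spec_extract_network_lines (log_text : String) (out : List String) : Prop := out = extract_network_lines_alt log_text
instance (log_text : String) (out : List String) : Decidable (Spec_extract_network_lines log_text out) := by unfold Spec_extract_network_lines; infer_instance

-- ===== CLAIM =====
def Claim_equal_extract_network_lines : Prop := ∀ (log_text : String), Dom_extract_network_lines log_text → Spec_extract_network_lines log_text (extract_network_lines log_text)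

-- ===== LEMMAS AND PROOFS =====

-- the eight patterns, lowered tests on a lowered line (shared by both per-line conditions)
def pvPats : List String :=
  ["Unable to resolve host", "UnknownHostException", "avatar", "speech",
   "AudioTrack", "MediaPlayer", "playback failed", "newstart"]

def pvCondLow (l : String) : Bool :=
  pvPats.any (fun pattern => PySem.Str.isIn (PySem.Str.lower pattern) l)

-- membership after one inner sweep: the old members plus the indices of matching lines
lemma pv_mem_inner (l : List (Int × String)) (q : String → Bool) (s : PySem.Set Int) (x : Int) :
    x ∈ l.foldl (fun s il => if q il.2 then PySem.Set.add s il.1 else s) s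
      ↔ x ∈ s ∨ ∃ il ∈ l, q il.2 = true ∧ x = il.1 := by
  induction l generalizing s with
  | nil => simp
  | cons hd tl ih =>
    simp only [List.foldl_cons, List.mem_cons]
    by_cases hq : q hd.2 = true
    · rw [hq, if_pos rfl, ih]
      simp only [PySem.Set.mem_add]
      constructor
      · rintro (⟨h | h⟩ | ⟨il, hm, hql, hx⟩)
        · exact Or.inl h
        · exact Or.inr ⟨hd, Or.inl rfl, hq, h⟩
        · exact Or.inr ⟨il, Or.inr hm, hql, hx⟩
      · rintro (h | ⟨il, hm | hm, hql, hx⟩)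
        · exact Or.inl (Or.inl h)
        · exact Or.inl (Or.inr (hm ▸ hx))
        · exact Or.inr ⟨il, hm, hql, hx⟩
    · rw [if_neg hq, ih]
      constructor
      · rintro (h | ⟨il, hm, hql, hx⟩)
        · exact Or.inl h
        · exact Or.inr ⟨il, Or.inr hm, hql, hx⟩
      · rintro (h | ⟨il, hm | hm, hql, hx⟩)
        · exact Or.inl h
        · exact absurd (hm ▸ hql) hq
        · exact Or.inr ⟨il, hm, hql, hx⟩

-- the inner sweep keeps the set duplicate-free
lemma pv_nodup_inner (l : List (Int × String)) (q : String → Bool) (s : PySem.Set Int)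
    (hs : s.Nodup) :
    (l.foldl (fun s il => if q il.2 then PySem.Set.add s il.1 else s) s).Nodup := by
  induction l generalizing s with
  | nil => exact hs
  | cons hd tl ih =>
    simp only [List.foldl_cons]
    split
    · exact ih _ (PySem.Set.nodup_add s hd.1 hs)
    · exact ih _ hs

-- membership after the outer (pattern-major) loop
lemma pv_mem_outer (pats : List String) (l : List (Int × String)) (s : PySem.Set Int) (x : Int) :
    x ∈ pats.foldl
          (fun hits pattern =>
            l.foldl (fun hits il =>
              if PySem.Str.isIn (PySem.Str.lower pattern) il.2 then PySem.Set.add hits il.1 else hits) hits)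
          s
      ↔ x ∈ s ∨ ∃ p ∈ pats, ∃ il ∈ l, PySem.Str.isIn (PySem.Str.lower p) il.2 = true ∧ x = il.1 := by
  induction pats generalizing s with
  | nil => simp
  | cons hd tl ih =>
    simp only [List.foldl_cons, List.mem_cons]
    rw [ih]
    rw [pv_mem_inner]
    constructor
    · rintro (⟨h | h⟩ | ⟨p, hp, hrest⟩)
      · exact Or.inl h
      · obtain ⟨il, hm, hq, hx⟩ := h
        exact Or.inr ⟨hd, Or.inl rfl, il, hm, hq, hx⟩
      · exact Or.inr ⟨p, Or.inr hp, hrest⟩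
    · rintro (h | ⟨p, hp | hp, hrest⟩)
      · exact Or.inl (Or.inl h)
      · exact Or.inl (Or.inr (hp ▸ hrest))
      · exact Or.inr ⟨p, hp, hrest⟩

-- the outer loop keeps the set duplicate-free
lemma pv_nodup_outer (pats : List String) (l : List (Int × String)) (s : PySem.Set Int)
    (hs : s.Nodup) :
    (pats.foldl
      (fun hits pattern =>
        l.foldl (fun hits il =>
          if PySem.Str.isIn (PySem.Str.lower pattern) il.2 then PySem.Set.add hits il.1 else hits) hits)
      s).Nodup := by
  induction pats generalizing s with
  | nil => exact hs
  | cons hd tl ih => exact ih _ (pv_nodup_inner _ _ _ hs)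

-- pyGetD over an appended element, at an index inside the prefix
lemma pv_pyGetD_append (xs : List α) (x : α) (k : Nat) (d : α) (hk : k < xs.length) :
    PySem.List.pyGetD (xs ++ [x]) (k : Int) d = PySem.List.pyGetD xs (k : Int) d := by
  rw [PySem.List.pyGetD_natCast, PySem.List.pyGetD_natCast,
    List.getD_eq_getElem?_getD, List.getD_eq_getElem?_getD, List.getElem?_append_left hk]

-- rebuilding from the filtered index list of the enumerated projections = filtering directly
lemma pv_reconstruct {α β : Type} (f : α → β) (d : α) (q : β → Bool) (xs : List α) :
    (((PySem.List.enumerate (xs.map f) 0).filter (fun il => q il.2)).map (fun il => il.1)).map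
        (fun i => PySem.List.pyGetD xs i d)
      = xs.filter (fun x => q (f x)) := by
  induction xs using List.reverseRecOn with
  | nil => rfl
  | append_singleton ys y ih =>
    rw [List.map_append, PySem.List.enumerate_append, List.filter_append, List.map_append,
      List.map_append, List.filter_append]
    have h1 : ((((PySem.List.enumerate (ys.map f) 0).filter (fun il => q il.2)).map (fun il => il.1)).map
        (fun i => PySem.List.pyGetD (ys ++ [y]) i d))
        = ys.filter (fun x => q (f x)) := by
      rw [← ih]
      apply List.map_congr_left
      intro i hi
      simp only [List.mem_map, List.mem_filter] at hi
      obtain ⟨il, ⟨hmem, -⟩, hx⟩ := hi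
      rw [PySem.List.mem_enumerate_iff] at hmem
      obtain ⟨k, hk, hil⟩ := hmem
      subst hx hil
      simp only [zero_add]
      exact pv_pyGetD_append ys y k d (by simpa using hk)
    rw [h1]
    congr 1
    by_cases hq : q (f y) = true
    · simp only [PySem.List.enumerate, List.filter_cons, List.filter_nil, hq, List.map_cons,
        List.map_nil, zero_add, List.length_map, if_true]
      rw [PySem.List.pyGetD_natCast]
      simp [List.getD_eq_getElem?_getD]
    · simp [PySem.List.enumerate, hq]

-- B's whole pipeline, for any line list, equals the direct filter
lemma pv_B_eq_filter (lines : List String) :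
    ((PySem.List.sorted
        (pvPats.foldl
          (fun hits pattern =>
            (PySem.List.enumerate (lines.map (fun line => PySem.Str.lower line)) 0).foldl
              (fun hits il =>
                if PySem.Str.isIn (PySem.Str.lower pattern) il.2 then PySem.Set.add hits il.1 else hits)
              hits)
          PySem.Set.empty)
        (fun i => i)).map (fun i => PySem.List.pyGetD lines i ""))
      = lines.filter (fun line => pvCondLow (PySem.Str.lower line)) := by
  set enum := PySem.List.enumerate (lines.map (fun line => PySem.Str.lower line)) 0 with henum
  set hits := pvPats.foldl
      (fun hits pattern =>
        enum.foldl
          (fun hits il =>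
            if PySem.Str.isIn (PySem.Str.lower pattern) il.2 then PySem.Set.add hits il.1 else hits)
          hits)
      PySem.Set.empty with hhits
  set T : List Int := (enum.filter (fun il => pvCondLow il.2)).map (fun il => il.1) with hT
  have hTmem : ∀ x : Int, x ∈ T ↔ ∃ il ∈ enum, pvCondLow il.2 = true ∧ x = il.1 := by
    intro x
    simp only [hT, List.mem_map, List.mem_filter]
    constructor
    · rintro ⟨il, ⟨hm, hc⟩, hx⟩; exact ⟨il, hm, hc, hx.symm⟩
    · rintro ⟨il, hm, hc, hx⟩; exact ⟨il, ⟨hm, hc⟩, hx.symm⟩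
  have hhitsmem : ∀ x : Int, x ∈ hits ↔ ∃ il ∈ enum, pvCondLow il.2 = true ∧ x = il.1 := by
    intro x
    rw [hhits, pv_mem_outer]
    simp only [List.mem_singleton, false_or, PySem.Set.empty]
    constructor
    · rintro (h | ⟨p, hp, il, hm, hq, hx⟩)
      · simp at h
      · exact ⟨il, hm, by simp only [pvCondLow, List.any_eq_true]; exact ⟨p, hp, hq⟩, hx⟩
    · rintro ⟨il, hm, hc, hx⟩
      simp only [pvCondLow, List.any_eq_true] at hc
      obtain ⟨p, hp, hq⟩ := hc
      exact Or.inr ⟨p, hp, il, hm, hq, hx⟩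
  have hTpair : T.Pairwise (· < ·) := by
    rw [hT]
    exact List.Pairwise.map _ (fun a b h => h)
      ((PySem.List.pairwise_lt_enumerate _ 0).filter _)
  have hTnodup : T.Nodup := hTpair.imp (fun h => ne_of_lt h)
  have hnodup : hits.Nodup := by
    rw [hhits]; exact pv_nodup_outer pvPats enum PySem.Set.empty List.nodup_nil
  have hperm : T.Perm hits :=
    (List.perm_ext_iff_of_nodup hTnodup hnodup).mpr
      (fun a => (hTmem a).trans (hhitsmem a).symm)
  rw [PySem.List.sorted_eq_of_perm_of_pairwise_lt hits T (fun i => i) hperm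
    (by simpa using hTpair)]
  rw [hT, henum]
  exact pv_reconstruct (fun line => PySem.Str.lower line) "" pvCondLow lines

-- ===== VERDICT =====
theorem extract_network_lines_spec : Claim_equal_extract_network_lines := by
  intro log_text _
  unfold Spec_extract_network_lines
  have hA : extract_network_lines log_text
      = (PySem.Str.splitlines log_text).filter (fun line => pvCondLow (PySem.Str.lower line)) := by
    show (PySem.Str.splitlines log_text).foldl
        (fun lines line => if pvCondLow (PySem.Str.lower line) then lines ++ [line] else lines) [] = _
    rw [PySem.List.foldl_append_if_eq_filter (fun line => pvCondLow (PySem.Str.lower line)),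
      List.nil_append]
  have hB : extract_network_lines_alt log_text
      = (PySem.Str.splitlines log_text).filter (fun line => pvCondLow (PySem.Str.lower line)) :=
    pv_B_eq_filter (PySem.Str.splitlines log_text)
  exact hA.trans hB.symm
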